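-- pv_equiv track=rewrite | github.com/luckyfrancisacidera/NEXSKILL | services/resume_parsing_service/app/parser/experience.py | _find_title_span
-- ===== SOURCE A (Python) =====
-- from typing import Any, Dict, List, Set, Tuple, Optional
--
-- def _find_title_span(tokens: List[str], title_phrases: Set[Tuple[str, ...]], max_len: int) -> Optional[Tuple[int, int]]:
--     if not tokens or not title_phrases:
--         return None
--
--     best = None
--     best_len = 0
--     n = len(tokens)
--
--     for i in range(n):
--         for L in range(min(max_len, n - i), 0, -1):
--             if L <= best_len:
--                 break
--             if tuple(tokens[i : i + L]) in title_phrases: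
--                 best = (i, i + L)
--                 best_len = L
--                 break
--
--     return best
-- ===== SOURCE B (Python) =====
-- from typing import List, Set, Tuple, Optional
--
-- def _find_title_span(tokens: List[str], title_phrases: Set[Tuple[str, ...]], max_len: int) -> Optional[Tuple[int, int]]:
--     if not tokens or not title_phrases:
--         return None
--     n = len(tokens)
--     for L in range(min(max_len, n), 0, -1):
--         for i in range(n - L + 1):
--             if tuple(tokens[i : i + L]) in title_phrases:
--                 return (i, i + L)
--     return None
-- ===== Notes on version B (the rewrite author's own statement) =====
-- stated objective: simpler
-- what changed: Replaces the position-major scan with a best/best_len accumulator and length-pruning breaks by a length-major scan (longest length first, earliest start first) that returns the first match directly, eliminating the accumulator state entirely.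
import Mathlib
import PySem

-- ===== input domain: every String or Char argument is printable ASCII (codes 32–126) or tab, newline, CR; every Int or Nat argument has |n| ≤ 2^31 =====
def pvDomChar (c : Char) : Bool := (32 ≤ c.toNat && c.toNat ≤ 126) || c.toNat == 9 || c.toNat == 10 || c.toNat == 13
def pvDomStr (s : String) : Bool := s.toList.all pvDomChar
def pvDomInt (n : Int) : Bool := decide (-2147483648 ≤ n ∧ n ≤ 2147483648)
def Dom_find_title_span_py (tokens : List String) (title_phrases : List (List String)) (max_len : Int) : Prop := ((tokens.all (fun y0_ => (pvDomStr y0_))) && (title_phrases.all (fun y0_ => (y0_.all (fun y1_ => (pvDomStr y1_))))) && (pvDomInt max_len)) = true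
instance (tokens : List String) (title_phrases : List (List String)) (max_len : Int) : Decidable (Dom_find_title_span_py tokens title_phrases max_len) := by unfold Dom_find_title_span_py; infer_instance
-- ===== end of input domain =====

-- B replaces A's position-major scan with accumulator state by a length-major scan returning the first match.

-- ===== PORT A =====
-- inner 'for L in range(min(max_len, n-i), 0, -1)' loop with its two breaks, over state (best, best_len)
def pvInnerA (tokens : List String) (title_phrases : List (List String)) (i : Int)
    (best : Option (Int × Int)) (bestLen : Int) : List Int → Option (Int × Int) × Int
  | [] => (best, bestLen)
  | L :: rest =>
    if L ≤ bestLen then (best, bestLen)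
    else if PySem.List.slice tokens (some i) (some (i + L)) ∈ title_phrases then
      (some (i, i + L), L)
    else pvInnerA tokens title_phrases i best bestLen rest

def find_title_span_py (tokens : List String) (title_phrases : List (List String)) (max_len : Int) : Option (Int × Int) :=
  if tokens = [] ∨ title_phrases = [] then none
  else
    let n : Int := (tokens.length : Int)
    ((PySem.List.pyRange 0 n 1).foldl
      (fun st i => pvInnerA tokens title_phrases i st.1 st.2
        (PySem.List.pyRange (min max_len (n - i)) 0 (-1)))
      (none, 0)).1

-- ===== PORT B =====
-- inner 'for i in range(n - L + 1)' loop: first i whose slice is a title phrase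
def pvInnerB (tokens : List String) (title_phrases : List (List String)) (L : Int) : List Int → Option (Int × Int)
  | [] => none
  | i :: rest =>
    if PySem.List.slice tokens (some i) (some (i + L)) ∈ title_phrases then some (i, i + L)
    else pvInnerB tokens title_phrases L rest

-- outer 'for L in range(min(max_len, n), 0, -1)' loop: return on the first inner hit
def pvOuterB (tokens : List String) (title_phrases : List (List String)) (n : Int) : List Int → Option (Int × Int)
  | [] => none
  | L :: rest =>
    match pvInnerB tokens title_phrases L (PySem.List.pyRange 0 (n - L + 1) 1) with
    | some r => some r
    | none => pvOuterB tokens title_phrases n rest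

def find_title_span_py_alt (tokens : List String) (title_phrases : List (List String)) (max_len : Int) : Option (Int × Int) :=
  if tokens = [] ∨ title_phrases = [] then none
  else
    let n : Int := (tokens.length : Int)
    pvOuterB tokens title_phrases n (PySem.List.pyRange (min max_len n) 0 (-1))

-- ===== PRECONDITION & SPEC =====
def Spec_find_title_span_py (tokens : List String) (title_phrases : List (List String)) (max_len : Int) (out : Option (Int × Int)) : Prop := out = find_title_span_py_alt tokens title_phrases max_len
instance (tokens : List String) (title_phrases : List (List String)) (max_len : Int) (out : Option (Int × Int)) : Decidable (Spec_find_title_span_py tokens title_phrases max_len out) := by unfold Spec_find_title_span_py; infer_instance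

-- ===== CLAIM (what is proved, stated in full; the proofs are below) =====
def Claim_equal_find_title_span_py : Prop := ∀ (tokens : List String) (title_phrases : List (List String)) (max_len : Int), Dom_find_title_span_py tokens title_phrases max_len → Spec_find_title_span_py tokens title_phrases max_len (find_title_span_py tokens title_phrases max_len)

-- ===== LEMMAS AND PROOFS =====

-- 'tokens[i:i+L] is a title phrase'
def pvM (tokens : List String) (title_phrases : List (List String)) (i L : Int) : Prop :=
  PySem.List.slice tokens (some i) (some (i + L)) ∈ title_phrases

-- the common characterisation both programs compute, for lengths 1..M0 and spans inside [0, n]: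
-- either no match at all, or the match of maximal length with the earliest start.
def pvGood (tokens : List String) (title_phrases : List (List String)) (n M0 : Int)
    (o : Option (Int × Int)) : Prop :=
  (o = none ∧ ∀ i L : Int, 0 ≤ i → 1 ≤ L → L ≤ M0 → i + L ≤ n → ¬ pvM tokens title_phrases i L) ∨
  (∃ i L : Int, o = some (i, i + L) ∧ 0 ≤ i ∧ 1 ≤ L ∧ L ≤ M0 ∧ i + L ≤ n ∧
    pvM tokens title_phrases i L ∧
    (∀ i' L' : Int, 0 ≤ i' → L < L' → L' ≤ M0 → i' + L' ≤ n → ¬ pvM tokens title_phrases i' L') ∧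
    (∀ i' : Int, 0 ≤ i' → i' < i → ¬ pvM tokens title_phrases i' L))

lemma pvGood_unique (tokens : List String) (title_phrases : List (List String)) (n M0 : Int)
    (o1 o2 : Option (Int × Int)) (h1 : pvGood tokens title_phrases n M0 o1)
    (h2 : pvGood tokens title_phrases n M0 o2) : o1 = o2 := by
  rcases h1 with ⟨e1, hno1⟩ | ⟨i1, L1, e1, hi1, hL1, hM01, hn1, hm1, hlong1, hearly1⟩ <;>
    rcases h2 with ⟨e2, hno2⟩ | ⟨i2, L2, e2, hi2, hL2, hM02, hn2, hm2, hlong2, hearly2⟩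
  · rw [e1, e2]
  · exact absurd hm2 (hno1 i2 L2 hi2 hL2 hM02 hn2)
  · exact absurd hm1 (hno2 i1 L1 hi1 hL1 hM01 hn1)
  · rcases lt_trichotomy L1 L2 with hL | hL | hL
    · exact absurd hm2 (hlong1 i2 L2 hi2 hL hM02 hn2)
    · subst hL
      rcases lt_trichotomy i1 i2 with hi | hi | hi
      · exact absurd hm1 (hearly2 i1 hi1 hi)
      · rw [e1, e2, hi]
      · exact absurd hm2 (hearly1 i2 hi2 hi)
    · exact absurd hm1 (hlong2 i1 L1 hi1 hL hM01 hn1)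

-- innerA computes the largest L ≤ M0 with bestLen < L matching at i, else leaves the state
lemma pvInnerA_spec (tokens : List String) (title_phrases : List (List String)) :
    ∀ (k : Nat) (M0 : Int), M0.toNat = k → ∀ (i bestLen : Int) (best : Option (Int × Int)),
    0 ≤ bestLen →
    (pvInnerA tokens title_phrases i best bestLen (PySem.List.pyRange M0 0 (-1)) = (best, bestLen) ∧
      ∀ L : Int, bestLen < L → L ≤ M0 → ¬ pvM tokens title_phrases i L) ∨
    (∃ L : Int, pvInnerA tokens title_phrases i best bestLen (PySem.List.pyRange M0 0 (-1)) = (some (i, i + L), L) ∧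
      bestLen < L ∧ L ≤ M0 ∧ pvM tokens title_phrases i L ∧
      ∀ L' : Int, L < L' → L' ≤ M0 → ¬ pvM tokens title_phrases i L') := by
  intro k
  induction k with
  | zero =>
    intro M0 hM0 i bestLen best hb
    have h0 : M0 ≤ 0 := by omega
    rw [PySem.List.pyRange_neg_one_eq_nil h0]
    left
    exact ⟨rfl, fun L h1 h2 _ => by omega⟩
  | succ k ih =>
    intro M0 hM0 i bestLen best hb
    have hpos : 0 < M0 := by omega
    rw [PySem.List.pyRange_neg_one_cons hpos]
    simp only [pvInnerA]
    by_cases hle : M0 ≤ bestLen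
    · rw [if_pos hle]
      left
      exact ⟨rfl, fun L h1 h2 _ => by omega⟩
    · rw [if_neg hle]
      by_cases hm : PySem.List.slice tokens (some i) (some (i + M0)) ∈ title_phrases
      · rw [if_pos hm]
        right
        exact ⟨M0, rfl, by omega, le_refl _, hm, fun L' h1 h2 _ => by omega⟩
      · rw [if_neg hm]
        rcases ih (M0 - 1) (by omega) i bestLen best hb with ⟨heq, hno⟩ | ⟨L, heq, h1, h2, hM, hmax⟩
        · left
          refine ⟨heq, fun L hl1 hl2 hML => ?_⟩
          rcases eq_or_lt_of_le hl2 with h | h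
          · subst h; exact hm hML
          · exact hno L hl1 (by omega) hML
        · right
          refine ⟨L, heq, h1, by omega, hM, fun L' hl1 hl2 hML => ?_⟩
          rcases eq_or_lt_of_le hl2 with h | h
          · subst h; exact hm hML
          · exact hmax L' hl1 (by omega) hML

-- invariant of A's outer fold over positions 0..c-1
def pvGoodA (tokens : List String) (title_phrases : List (List String)) (max_len n c : Int)
    (st : Option (Int × Int) × Int) : Prop :=
  (st = (none, 0) ∧ ∀ i L : Int, 0 ≤ i → i < c → 1 ≤ L → L ≤ max_len → i + L ≤ n →
      ¬ pvM tokens title_phrases i L) ∨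
  (∃ i L : Int, st = (some (i, i + L), L) ∧ 0 ≤ i ∧ i < c ∧ 1 ≤ L ∧ L ≤ max_len ∧ i + L ≤ n ∧
    pvM tokens title_phrases i L ∧
    (∀ i' L' : Int, 0 ≤ i' → i' < c → L < L' → L' ≤ max_len → i' + L' ≤ n →
      ¬ pvM tokens title_phrases i' L') ∧
    (∀ i' : Int, 0 ≤ i' → i' < i → ¬ pvM tokens title_phrases i' L))

lemma pvStepA (tokens : List String) (title_phrases : List (List String)) (max_len n c : Int)
    (st : Option (Int × Int) × Int) (hc : 0 ≤ c)
    (h : pvGoodA tokens title_phrases max_len n c st) :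
    pvGoodA tokens title_phrases max_len n (c + 1)
      (pvInnerA tokens title_phrases c st.1 st.2 (PySem.List.pyRange (min max_len (n - c)) 0 (-1))) := by
  rcases h with ⟨e, hno⟩ | ⟨i0, L0, e, hi0, hic, hL0, hml, hn0, hm0, hlong0, hearly0⟩
  · simp only [e]
    rcases pvInnerA_spec tokens title_phrases (min max_len (n - c)).toNat (min max_len (n - c)) rfl
        c 0 none le_rfl with ⟨heq, hnoL⟩ | ⟨L, heq, hbl, hLM0, hM, hmax⟩
    · left
      refine ⟨heq, fun i L hi hic1 hL1 hLm hn1 hM => ?_⟩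
      rcases eq_or_lt_of_le (show i ≤ c by omega) with hh | hh
      · subst hh; exact hnoL L (by omega) (by omega) hM
      · exact hno i L hi hh hL1 hLm hn1 hM
    · right
      refine ⟨c, L, heq, hc, by omega, by omega, by omega, by omega, hM,
        fun i' L' hi' hic' hL' hLm' hn' hM' => ?_, fun i' hi' hii' => ?_⟩
      · rcases eq_or_lt_of_le (show i' ≤ c by omega) with hh | hh
        · subst hh; exact hmax L' (by omega) (by omega) hM'
        · exact hno i' L' hi' hh (by omega) hLm' hn' hM'
      · exact hno i' L hi' (by omega) (by omega) (by omega) (by omega)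
  · simp only [e]
    rcases pvInnerA_spec tokens title_phrases (min max_len (n - c)).toNat (min max_len (n - c)) rfl
        c L0 (some (i0, i0 + L0)) (by omega) with ⟨heq, hnoL⟩ | ⟨L, heq, hbl, hLM0, hM, hmax⟩
    · right
      refine ⟨i0, L0, heq, hi0, by omega, hL0, hml, hn0, hm0,
        fun i' L' hi' hic' hL' hLm' hn' hM' => ?_, hearly0⟩
      rcases eq_or_lt_of_le (show i' ≤ c by omega) with hh | hh
      · subst hh; exact hnoL L' (by omega) (by omega) hM'
      · exact hlong0 i' L' hi' hh hL' hLm' hn' hM'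
    · right
      refine ⟨c, L, heq, hc, by omega, by omega, by omega, by omega, hM,
        fun i' L' hi' hic' hL' hLm' hn' hM' => ?_, fun i' hi' hii' => ?_⟩
      · rcases eq_or_lt_of_le (show i' ≤ c by omega) with hh | hh
        · subst hh; exact hmax L' (by omega) (by omega) hM'
        · exact hlong0 i' L' hi' hh (by omega) hLm' hn' hM'
      · exact hlong0 i' L hi' (by omega) (by omega) (by omega) (by omega)

lemma pvFoldA_good (tokens : List String) (title_phrases : List (List String)) (max_len n : Int) :
    ∀ (k : Nat) (c : Int), c.toNat = k → 0 ≤ c →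
    pvGoodA tokens title_phrases max_len n c
      ((PySem.List.pyRange 0 c 1).foldl
        (fun st i => pvInnerA tokens title_phrases i st.1 st.2
          (PySem.List.pyRange (min max_len (n - i)) 0 (-1)))
        (none, 0)) := by
  intro k
  induction k with
  | zero =>
    intro c hk hc
    have hc0 : c = 0 := by omega
    subst hc0
    rw [PySem.List.pyRange_one_eq_nil le_rfl]
    left
    exact ⟨rfl, fun i L h1 h2 h3 h4 h5 _ => by omega⟩
  | succ k ih =>
    intro c hk hc
    have hc1 : c = (c - 1) + 1 := by omega
    rw [hc1, PySem.List.pyRange_one_succ_right (by omega), List.foldl_append]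
    simp only [List.foldl]
    exact pvStepA tokens title_phrases max_len n (c - 1) _ (by omega) (ih (c - 1) (by omega) (by omega))

lemma pvGoodA_to_good (tokens : List String) (title_phrases : List (List String)) (max_len n : Int)
    (st : Option (Int × Int) × Int)
    (h : pvGoodA tokens title_phrases max_len n n st) :
    pvGood tokens title_phrases n (min max_len n) st.1 := by
  rcases h with ⟨e, hno⟩ | ⟨i0, L0, e, hi0, hic, hL0, hml, hn0, hm0, hlong0, hearly0⟩
  · rw [e]
    left
    exact ⟨rfl, fun i L h1 h2 h3 h4 => hno i L h1 (by omega) h2 (by omega) h4⟩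
  · rw [e]
    right
    refine ⟨i0, L0, rfl, hi0, hL0, le_min hml (by omega), hn0, hm0,
      fun i' L' h1 h2 h3 h4 => hlong0 i' L' h1 (by omega) h2 (by omega) h4, hearly0⟩

-- innerB finds the earliest start in [a, b) matching at length L
lemma pvInnerB_spec (tokens : List String) (title_phrases : List (List String)) (L : Int) :
    ∀ (k : Nat) (a b : Int), (b - a).toNat = k →
    (pvInnerB tokens title_phrases L (PySem.List.pyRange a b 1) = none ∧
      ∀ i : Int, a ≤ i → i < b → ¬ pvM tokens title_phrases i L) ∨
    (∃ i : Int, pvInnerB tokens title_phrases L (PySem.List.pyRange a b 1) = some (i, i + L) ∧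
      a ≤ i ∧ i < b ∧ pvM tokens title_phrases i L ∧
      ∀ i' : Int, a ≤ i' → i' < i → ¬ pvM tokens title_phrases i' L) := by
  intro k
  induction k with
  | zero =>
    intro a b hk
    have hba : b ≤ a := by omega
    rw [PySem.List.pyRange_one_eq_nil hba]
    left
    exact ⟨rfl, fun i h1 h2 _ => by omega⟩
  | succ k ih =>
    intro a b hk
    have hab : a < b := by omega
    rw [PySem.List.pyRange_one_cons hab]
    simp only [pvInnerB]
    by_cases hm : PySem.List.slice tokens (some a) (some (a + L)) ∈ title_phrases
    · rw [if_pos hm]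
      right
      exact ⟨a, rfl, le_refl _, hab, hm, fun i' h1 h2 _ => by omega⟩
    · rw [if_neg hm]
      rcases ih (a + 1) b (by omega) with ⟨heq, hno⟩ | ⟨i, heq, h1, h2, hM, hearly⟩
      · left
        refine ⟨heq, fun i h1 h2 hM => ?_⟩
        rcases eq_or_lt_of_le h1 with h | h
        · subst h; exact hm hM
        · exact hno i (by omega) h2 hM
      · right
        refine ⟨i, heq, by omega, h2, hM, fun i' h1 h2 hM => ?_⟩
        rcases eq_or_lt_of_le h1 with h | h
        · subst h; exact hm hM
        · exact hearly i' (by omega) h2 hM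

lemma pvOuterB_good (tokens : List String) (title_phrases : List (List String)) (n : Int) :
    ∀ (k : Nat) (M0 : Int), M0.toNat = k →
    pvGood tokens title_phrases n M0
      (pvOuterB tokens title_phrases n (PySem.List.pyRange M0 0 (-1))) := by
  intro k
  induction k with
  | zero =>
    intro M0 hM0
    have h0 : M0 ≤ 0 := by omega
    rw [PySem.List.pyRange_neg_one_eq_nil h0]
    left
    exact ⟨rfl, fun i L h1 h2 h3 h4 _ => by omega⟩
  | succ k ih =>
    intro M0 hM0
    have hpos : 0 < M0 := by omega
    rw [PySem.List.pyRange_neg_one_cons hpos]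
    simp only [pvOuterB]
    rcases pvInnerB_spec tokens title_phrases M0 ((n - M0 + 1) - 0).toNat 0 (n - M0 + 1) rfl with
      ⟨heq, hno⟩ | ⟨i, heq, h1, h2, hM, hearly⟩
    · simp only [heq]
      rcases ih (M0 - 1) (by omega) with ⟨e, hno'⟩ | ⟨i, L, e, hi, hL1, hL2, hn, hm, hlong, hearly'⟩
      · left
        refine ⟨e, fun i L hi hL1 hL2 hn hM => ?_⟩
        rcases eq_or_lt_of_le hL2 with h | h
        · subst h; exact hno i hi (by omega) hM
        · exact hno' i L hi hL1 (by omega) hn hM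
      · right
        refine ⟨i, L, e, hi, hL1, by omega, hn, hm, fun i' L' hi' hL' hL'2 hn' hM' => ?_, hearly'⟩
        rcases eq_or_lt_of_le hL'2 with h | h
        · subst h; exact hno i' hi' (by omega) hM'
        · exact hlong i' L' hi' hL' (by omega) hn' hM'
    · simp only [heq]
      right
      exact ⟨i, M0, rfl, h1, by omega, le_refl _, by omega, hM,
        fun i' L' _ hl1 hl2 _ _ => by omega, fun i' hi1 hi2 => hearly i' hi1 hi2⟩

-- ===== VERDICT (by name: the statement is the Claim_ definition above) =====
theorem find_title_span_py_spec : Claim_equal_find_title_span_py := by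
  intro tokens title_phrases max_len _
  unfold Spec_find_title_span_py find_title_span_py find_title_span_py_alt
  by_cases hg : tokens = [] ∨ title_phrases = []
  · simp [hg]
  · simp only [hg, if_false]
    have hA := pvFoldA_good tokens title_phrases max_len (tokens.length : Int)
      ((tokens.length : Int)).toNat (tokens.length : Int) rfl (by positivity)
    have hA' := pvGoodA_to_good tokens title_phrases max_len (tokens.length : Int) _ hA
    have hB := pvOuterB_good tokens title_phrases (tokens.length : Int)
      ((min max_len (tokens.length : Int))).toNat (min max_len (tokens.length : Int)) rfl
    exact pvGood_unique tokens title_phrases (tokens.length : Int) (min max_len (tokens.length : Int)) _ _ hA' hB
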